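-- pv_equiv track=rewrite | github.com/Dextromethorpan/Algorithms-in-Python | Python_Works/List/list6.py | indices_impairs_tries
-- ===== SOURCE A (Python) =====
-- def indices_impairs_tries(L):
--     trie = True
--     i = 0
--     while trie and i < len(L)-2:
--         if L[i] > L[i+2]:
--             trie = False
--         i += 2
--     return trie
-- ===== SOURCE B (Python) =====
-- def indices_impairs_tries(L):
--     s = [L[j] for j in range(0, len(L), 2)]
--     return s == sorted(s)
-- ===== Notes on version B (the rewrite author's own statement) =====
-- stated objective: idiomatic
-- what changed: Replaces the stride-2 while-loop with an early-exit flag by extracting the even-indexed subsequence once and comparing it to its sorted copy (sort-and-compare instead of adjacent-pair scan).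
import Mathlib
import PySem

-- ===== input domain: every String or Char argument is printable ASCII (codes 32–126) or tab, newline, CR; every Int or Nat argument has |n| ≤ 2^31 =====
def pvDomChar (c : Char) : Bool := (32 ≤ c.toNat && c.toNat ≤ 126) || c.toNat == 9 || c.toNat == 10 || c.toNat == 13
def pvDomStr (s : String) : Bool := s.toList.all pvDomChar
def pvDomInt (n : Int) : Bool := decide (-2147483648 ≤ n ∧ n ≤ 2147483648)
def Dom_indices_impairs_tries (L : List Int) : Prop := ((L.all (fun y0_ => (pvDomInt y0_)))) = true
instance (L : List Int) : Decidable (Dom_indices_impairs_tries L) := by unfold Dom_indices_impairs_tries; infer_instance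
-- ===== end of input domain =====

-- B extracts the even-indexed subsequence once and tests it by sort-and-compare,
-- replacing A's stride-2 while-loop with an early-exit flag (idiomatic rewrite, same results).


-- ===== PORT A =====
-- the while loop: state is (trie, i); indices L[i], L[i+2] are in range whenever the guard holds
def loopA (L : List Int) (trie : Bool) (i : Nat) : Bool :=
  if h : trie = true ∧ (i : Int) < (L.length : Int) - 2 then
    loopA L (if PySem.List.pyGetD L i 0 > PySem.List.pyGetD L (i + 2) 0 then false else trie) (i + 2)
  else trie
termination_by L.length - i
decreasing_by omega

def indices_impairs_tries (L : List Int) : Bool := loopA L true 0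

-- ===== PORT B =====
def indices_impairs_tries_alt (L : List Int) : Bool :=
  let s := (PySem.List.pyRange 0 (L.length : Int) 2).map (fun j => PySem.List.pyGetD L j 0)
  s == PySem.List.sorted s (fun x => x) false

-- ===== PRECONDITION & SPEC =====
def Spec_indices_impairs_tries (L : List Int) (out : Bool) : Prop := out = indices_impairs_tries_alt L
instance (L : List Int) (out : Bool) : Decidable (Spec_indices_impairs_tries L out) := by unfold Spec_indices_impairs_tries; infer_instance

-- ===== CLAIM (what is proved, stated in full; the proofs are below) =====
def Claim_equal_indices_impairs_tries : Prop := ∀ (L : List Int), Dom_indices_impairs_tries L → Spec_indices_impairs_tries L (indices_impairs_tries L)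

-- ===== LEMMAS AND PROOFS =====

-- the even-indexed subsequence L[0], L[2], L[4], …
def evens : List Int → List Int
  | [] => []
  | [a] => [a]
  | a :: _ :: t => a :: evens t

-- boolean adjacent-pair chain test (what A's loop computes on `evens L`)
def chB : List Int → Bool
  | a :: b :: t => (decide (a ≤ b)) && chB (b :: t)
  | _ => true

lemma chB_iff_pairwise (s : List Int) : chB s = true ↔ s.Pairwise (fun a b => a ≤ b) := by
  induction s with
  | nil => simp [chB]
  | cons a t ih =>
    cases t with
    | nil => simp [chB]
    | cons b u =>
      simp only [chB, Bool.and_eq_true, decide_eq_true_eq, ih, List.pairwise_cons, List.mem_cons]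
      constructor
      · rintro ⟨hab, hb, hu⟩
        refine ⟨?_, hb, hu⟩
        intro x hx
        rcases hx with rfl | hx
        · exact hab
        · exact le_trans hab (hb x hx)
      · rintro ⟨ha, hb, hu⟩
        exact ⟨ha b (Or.inl rfl), hb, hu⟩

lemma beq_sorted_eq_chB (s : List Int) :
    (s == PySem.List.sorted s (fun x => x) false) = chB s := by
  cases hc : chB s with
  | true =>
    have hp : s.Pairwise (fun a b => a ≤ b) := (chB_iff_pairwise s).mp hc
    rw [PySem.List.sorted_eq_self_of_pairwise s (fun x => x) hp]
    simp
  | false =>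
    by_contra h
    have hbeq : (s == PySem.List.sorted s (fun x => x) false) = true := by
      cases hb : (s == PySem.List.sorted s (fun x => x) false) <;> simp_all
    have hs : s = PySem.List.sorted s (fun x => x) false := by
      exact eq_of_beq hbeq
    have hp : s.Pairwise (fun a b => a ≤ b) := by
      rw [hs]; exact PySem.List.sorted_pairwise s (fun x => x)
    rw [(chB_iff_pairwise s).mpr hp] at hc
    simp at hc

-- the Nat-form comprehension equals `evens`
lemma range_getD_eq_evens (L : List Int) :
    (List.range ((L.length + 1) / 2)).map (fun k => L.getD (2 * k) 0) = evens L := by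
  induction L using evens.induct with
  | case1 => simp [evens]
  | case2 a => simp [evens, List.range_succ]
  | case3 a b t ih =>
    have hlen : ((a :: b :: t).length + 1) / 2 = (t.length + 1) / 2 + 1 := by
      simp only [List.length_cons]; omega
    rw [hlen, List.range_succ_eq_map, List.map_cons, List.map_map]
    have : (fun k => (a :: b :: t).getD (2 * k) 0) ∘ (· + 1)
         = (fun k => t.getD (2 * k) 0) := by
      funext k
      simp only [Function.comp_apply]
      have : 2 * (k + 1) = (2 * k) + 1 + 1 := by omega
      simp [this, List.getD]
    rw [this, ih]
    simp [evens, List.getD]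

-- bridge: B's comprehension over pyRange equals `evens L`
lemma comp_eq_evens (L : List Int) :
    (PySem.List.pyRange 0 (L.length : Int) 2).map (fun j => PySem.List.pyGetD L j 0) = evens L := by
  rw [PySem.List.pyRange_of_pos 0 (L.length : Int) (by norm_num), List.map_map]
  have hcnt : (if (0 : Int) < (L.length : Int) then (((L.length : Int) - 0 + 2 - 1) / 2).toNat else 0)
      = (L.length + 1) / 2 := by
    split
    · omega
    · omega
  rw [hcnt]
  rw [← range_getD_eq_evens L]
  apply List.map_congr_left
  intro k _
  simp only [Function.comp_apply]
  have h2 : (0 : Int) + 2 * (k : Int) = ((2 * k : Nat) : Int) := by push_cast; ring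
  rw [h2, PySem.List.pyGetD_natCast]

lemma loopA_false (L : List Int) (i : Nat) : loopA L false i = false := by
  rw [loopA]; simp

lemma loopA_true (d : Nat) : ∀ (L : List Int) (i : Nat), L.length - i ≤ d →
    loopA L true i = chB (evens (L.drop i)) := by
  induction d with
  | zero =>
    intro L i h
    have hle : L.length ≤ i := by omega
    rw [loopA]
    rw [dif_neg (by omega)]
    rw [List.drop_eq_nil_of_le hle]
    simp [evens, chB]
  | succ d ih =>
    intro L i h
    rw [loopA]
    by_cases hg : (i : Int) < (L.length : Int) - 2
    · rw [dif_pos ⟨rfl, hg⟩]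
      have h3 : 3 ≤ (L.drop i).length := by
        rw [List.length_drop]; omega
      -- decompose the suffix
      obtain ⟨a, u, hau⟩ : ∃ a u, L.drop i = a :: u := by
        cases hdi : L.drop i with
        | nil => rw [hdi] at h3; simp at h3
        | cons a u => exact ⟨a, u, rfl⟩
      obtain ⟨b, v, hbv⟩ : ∃ b v, u = b :: v := by
        cases hu : u with
        | nil => rw [hu] at hau; rw [hau] at h3; simp at h3
        | cons b v => exact ⟨b, v, rfl⟩
      obtain ⟨c, w, hcw⟩ : ∃ c w, v = c :: w := by
        cases hv : v with
        | nil => rw [hv] at hbv; rw [hbv] at hau; rw [hau] at h3; simp at h3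
        | cons c w => exact ⟨c, w, rfl⟩
      have hdrop : L.drop i = a :: b :: c :: w := by rw [hau, hbv, hcw]
      have hdrop2 : L.drop (i + 2) = c :: w := by
        have h2 : L.drop (i + 2) = (L.drop i).drop 2 := by
          rw [List.drop_drop, Nat.add_comm i 2]
        rw [h2, hdrop]; rfl
      have hga : PySem.List.pyGetD L (i : Int) 0 = a := by
        rw [PySem.List.pyGetD_natCast]
        have : L.getD i 0 = (L.drop i).getD 0 0 := by
          simp [List.getD_eq_getElem?_getD, List.getElem?_drop]
        rw [this, hdrop]; rfl
      have hgc : PySem.List.pyGetD L ((i : Int) + 2) 0 = c := by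
        have : (i : Int) + 2 = ((i + 2 : Nat) : Int) := by push_cast; ring
        rw [this, PySem.List.pyGetD_natCast]
        have : L.getD (i + 2) 0 = (L.drop (i + 2)).getD 0 0 := by
          simp [List.getD_eq_getElem?_getD, List.getElem?_drop]
        rw [this, hdrop2]; rfl
      have hrec : loopA L true (i + 2) = chB (evens (L.drop (i + 2))) := by
        apply ih
        omega
      have hev : evens (L.drop i) = a :: evens (c :: w) := by
        rw [hdrop]; rfl
      have hhead : ∃ r, evens (c :: w) = c :: r := by
        cases w with
        | nil => exact ⟨[], rfl⟩
        | cons x y => exact ⟨evens y, rfl⟩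
      obtain ⟨r, hr⟩ := hhead
      push_cast at hga hgc ⊢
      rw [hga, hgc]
      by_cases hac : a > c
      · rw [if_pos hac, loopA_false]
        rw [hev, hr]
        simp [chB]
        intro hle
        exact absurd hle (by omega)
      · rw [if_neg hac, hrec, hdrop2, hr, hev, hr]
        have hstep : chB (a :: c :: r) = ((decide (a ≤ c)) && chB (c :: r)) := rfl
        rw [hstep, decide_eq_true (by omega : a ≤ c), Bool.true_and]
    · rw [dif_neg (by simp [hg])]
      have h2 : (L.drop i).length ≤ 2 := by
        rw [List.length_drop]; omega
      cases hdi : L.drop i with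
      | nil => simp [evens, chB]
      | cons a u =>
        cases u with
        | nil => simp [evens, chB]
        | cons b v =>
          cases v with
          | nil => simp [evens, chB]
          | cons c w => rw [hdi] at h2; simp at h2

-- ===== VERDICT (by name: the statement is the Claim_ definition above) =====
theorem indices_impairs_tries_spec : Claim_equal_indices_impairs_tries := by
  intro L _
  unfold Spec_indices_impairs_tries indices_impairs_tries indices_impairs_tries_alt
  rw [loopA_true L.length L 0 (by omega), comp_eq_evens, beq_sorted_eq_chB]
  simp
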